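-- pv_equiv track=rewrite | github.com/TheL0L/FlyTracker | data_postprocess.py | propagate_links
-- ===== SOURCE A (Python) =====
-- def propagate_links(links):
--     """
--     Propagate links to collapse chains of swapped IDs.
--
--     Args:
--         links (dict): Dictionary of swapped-to-original ID mappings.
--
--     Returns:
--         dict: Collapsed dictionary of ID mappings.
--     """
--     collapsed = {}
--     for swapped in links:
--         current = swapped
--         while current in links and current != links[current]:
--             current = links[current]
--         collapsed[swapped] = current
--     return collapsed
-- ===== SOURCE B (Python) =====
-- def propagate_links(links):
--     """
--     Propagate links to collapse chains of swapped IDs.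
--
--     Memoized path-following: walk a chain only until a cached node, a
--     terminal, or a revisited node (cycle guard), then cache the resolved
--     endpoint for every node on the walked path, so each node is walked
--     at most once overall.
--     """
--     cache = {}
--     collapsed = {}
--     for k in links:
--         path = []
--         seen = set()
--         cur = k
--         while cur not in cache and cur in links and cur != links[cur] and cur not in seen:
--             seen.add(cur)
--             path.append(cur)
--             cur = links[cur]
--         end = cache.get(cur, cur)
--         for p in path:
--             cache[p] = end
--         collapsed[k] = end
--     return collapsed
-- ===== Notes on version B (the rewrite author's own statement) =====
-- stated objective: alternative
-- what changed: B memoizes resolved terminals (union-find style path compression): it walks a chain only until it hits a cached node, a terminal, or a revisited node (cycle guard), then caches the terminal for every node on the walked path, instead of A's full per-key chain re-walk; each node is walked at most once overall.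
-- outside the precondition, e.g. on propagate_links({1: 2, 2: 1}): A does not finish within the time limit, B returns {1: 1, 2: 1}
import Mathlib
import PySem

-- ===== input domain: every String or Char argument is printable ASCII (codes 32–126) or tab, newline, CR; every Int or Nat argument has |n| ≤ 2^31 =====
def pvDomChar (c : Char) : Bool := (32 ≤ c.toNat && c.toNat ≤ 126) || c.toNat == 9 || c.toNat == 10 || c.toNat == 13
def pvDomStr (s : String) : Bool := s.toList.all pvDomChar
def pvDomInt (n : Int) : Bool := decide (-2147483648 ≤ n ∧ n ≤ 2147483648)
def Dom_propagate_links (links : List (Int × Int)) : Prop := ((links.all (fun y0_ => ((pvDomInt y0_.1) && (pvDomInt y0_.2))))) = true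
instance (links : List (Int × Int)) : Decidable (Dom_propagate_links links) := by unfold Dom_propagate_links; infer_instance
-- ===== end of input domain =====

-- B replaces A's per-key full chain walk by memoized path-following with a cycle guard
-- (each node's terminal is cached once); return values proved equal wherever A terminates.

-- ===== PORT A =====
-- A's while loop: follow the chain until `current` is terminal. `fuel` bounds the steps;
-- on Pre_ inputs every chain reaches its terminal within `d.size` steps, so fuel `d.size` is exact.
def pvFollowA (d : PySem.Dict Int Int) : Nat → Int → Int
  | 0, x => x
  | fuel + 1, x =>
    if d.contains x ∧ x ≠ d.getD x x then pvFollowA d fuel (d.getD x x) else x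

def propagate_links (links : List (Int × Int)) : List (Int × Int) :=
  let d := PySem.Dict.ofList links
  (d.keys.foldl (fun c k => c.insert k (pvFollowA d d.size k)) PySem.Dict.empty).items

-- ===== PORT B =====
-- B's inner while loop: walk until `cur` is cached, terminal or revisited (cycle guard),
-- collecting the path; `seen` is the Python set of visited nodes.
def pvWalk (d cache : PySem.Dict Int Int) : Nat → Int → List Int → List Int → List Int × Int
  | 0, cur, path, _ => (path, cur)
  | fuel + 1, cur, path, seen =>
    if ¬ cache.contains cur ∧ (d.contains cur ∧ cur ≠ d.getD cur cur ∧ cur ∉ seen) then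
      pvWalk d cache fuel (d.getD cur cur) (path ++ [cur]) (PySem.Set.add seen cur)
    else (path, cur)

-- B's for loop over the keys, threading (cache, collapsed).
def pvLoopB (d : PySem.Dict Int Int) :
    List Int → PySem.Dict Int Int → PySem.Dict Int Int → PySem.Dict Int Int
  | [], _, res => res
  | k :: ks, cache, res =>
    let r := pvWalk d cache d.size k [] []
    let e := cache.getD r.2 r.2
    pvLoopB d ks (r.1.foldl (fun c p => c.insert p e) cache) (res.insert k e)

def propagate_links_alt (links : List (Int × Int)) : List (Int × Int) :=
  let d := PySem.Dict.ofList links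
  (pvLoopB d d.keys PySem.Dict.empty PySem.Dict.empty).items

-- ===== PRECONDITION & SPEC =====
def pvStep (d : PySem.Dict Int Int) (x : Int) : Int := d.getD x x

-- Pre_ excludes exactly the inputs on which A's while loop never terminates (Python A diverges):
-- mappings containing a cycle of length ≥ 2. Closed form: from every key, |d| applications of the
-- step function reach a fixed point.
def Pre_propagate_links (links : List (Int × Int)) : Prop :=
  let d := PySem.Dict.ofList links
  ∀ k ∈ d.keys, pvStep d ((pvStep d)^[d.size] k) = (pvStep d)^[d.size] k
instance (links : List (Int × Int)) : Decidable (Pre_propagate_links links) := by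
  unfold Pre_propagate_links; infer_instance

def pvWitness_propagate_links : (List (Int × Int)) := [(1, 2), (2, 3), (3, 3), (5, 5)]

def Spec_propagate_links (links : List (Int × Int)) (out : List (Int × Int)) : Prop :=
  out = propagate_links_alt links
instance (links : List (Int × Int)) (out : List (Int × Int)) :
    Decidable (Spec_propagate_links links out) := by unfold Spec_propagate_links; infer_instance

-- ===== CLAIM (what is proved, stated in full; the proofs are below) =====
def Claim_equal_propagate_links : Prop :=
  ∀ (links : List (Int × Int)), Dom_propagate_links links → Pre_propagate_links links →
    Spec_propagate_links links (propagate_links links)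

-- ===== LEMMAS AND PROOFS =====

-- The terminal ("limit") of x under the step function of d.
def pvL (d : PySem.Dict Int Int) (x : Int) : Int := (pvStep d)^[d.size] x

theorem pvStep_fix (d : PySem.Dict Int Int)
    (hfix : ∀ k ∈ d.keys, pvStep d ((pvStep d)^[d.size] k) = (pvStep d)^[d.size] k)
    (x : Int) : pvStep d (pvL d x) = pvL d x := by
  by_cases hc : d.contains x = true
  · exact hfix x ((PySem.Dict.contains_iff_mem_keys d x).mp hc)
  · have hx : pvStep d x = x := by
      simpa [pvStep] using PySem.Dict.getD_of_not_contains (d := d) (k := x) (d0 := x)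
        (by simpa using hc)
    simp [pvL, Function.iterate_fixed hx, hx]

theorem pvL_step (d : PySem.Dict Int Int)
    (hfix : ∀ k ∈ d.keys, pvStep d ((pvStep d)^[d.size] k) = (pvStep d)^[d.size] k)
    (x : Int) : pvL d (pvStep d x) = pvL d x := by
  have h1 : pvL d (pvStep d x) = (pvStep d)^[d.size + 1] x := by
    simp [pvL, Function.iterate_succ_apply]
  rw [h1, Function.iterate_succ_apply']
  exact pvStep_fix d hfix x

theorem pvFollowA_eq (d : PySem.Dict Int Int) :
    ∀ (fuel : Nat) (x : Int), pvFollowA d fuel x = (pvStep d)^[fuel] x := by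
  intro fuel
  induction fuel with
  | zero => intro x; simp [pvFollowA]
  | succ n ih =>
    intro x
    by_cases h : d.contains x = true ∧ x ≠ d.getD x x
    · simp only [pvFollowA, if_pos h, ih]
      rw [Function.iterate_succ_apply]; rfl
    · have hx : pvStep d x = x := by
        by_cases hc : d.contains x = true
        · rcases not_and_or.mp h with h1 | h2
          · exact absurd hc h1
          · have := not_not.mp h2
            simp [pvStep, ← this]
        · simpa [pvStep] using PySem.Dict.getD_of_not_contains (d := d) (k := x) (d0 := x)
            (by simpa using hc)
      simp only [pvFollowA, if_neg h]
      exact (Function.iterate_fixed hx (n + 1)).symm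

-- cache correctness invariant: every cached value is the terminal of its key
def pvGood (d cache : PySem.Dict Int Int) : Prop :=
  ∀ x v, cache.get? x = some v → v = pvL d x

theorem pvGood_getD (d cache : PySem.Dict Int Int) (hG : pvGood d cache) (x : Int)
    (hx : pvStep d x = x) : cache.getD x x = pvL d x := by
  cases hv : cache.get? x with
  | none =>
    rw [PySem.Dict.getD_of_get?_eq_none cache x hv]
    simp [pvL, Function.iterate_fixed hx]
  | some v =>
    rw [PySem.Dict.getD_of_get?_eq_some cache x hv]
    exact hG x v hv

-- a node on a nontrivial cycle that also has an eventually-fixed orbit is itself fixed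
theorem pvPeriod_fix (d : PySem.Dict Int Int) (x : Int) (m fuel : Nat) (hm : 1 ≤ m)
    (hper : (pvStep d)^[m] x = x)
    (hf : pvStep d ((pvStep d)^[fuel] x) = (pvStep d)^[fuel] x) : pvStep d x = x := by
  have ht : (pvStep d)^[m * fuel] x = x := by
    rw [Function.iterate_mul]
    exact Function.iterate_fixed hper fuel
  have hle : fuel ≤ m * fuel := Nat.le_mul_of_pos_left fuel hm
  have h2 : (pvStep d)^[m * fuel] x = (pvStep d)^[fuel] x := by
    rw [← Nat.sub_add_cancel hle, Function.iterate_add_apply]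
    exact Function.iterate_fixed hf _
  have hx : x = (pvStep d)^[fuel] x := by rw [← h2, ht]
  rw [← hx] at hf
  exact hf

theorem pvWalk_spec (d : PySem.Dict Int Int)
    (hfix : ∀ k ∈ d.keys, pvStep d ((pvStep d)^[d.size] k) = (pvStep d)^[d.size] k)
    (cache : PySem.Dict Int Int) (hG : pvGood d cache) :
    ∀ (fuel : Nat) (x : Int) (path seen : List Int),
      pvStep d ((pvStep d)^[fuel] x) = (pvStep d)^[fuel] x →
      (∀ q ∈ seen, ∃ m, 1 ≤ m ∧ (pvStep d)^[m] q = x) →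
      cache.getD (pvWalk d cache fuel x path seen).2 (pvWalk d cache fuel x path seen).2
        = pvL d x ∧
      ∀ q ∈ (pvWalk d cache fuel x path seen).1, q ∈ path ∨ pvL d q = pvL d x := by
  intro fuel
  induction fuel with
  | zero =>
    intro x path seen hf _
    refine ⟨?_, fun q hq => Or.inl hq⟩
    exact pvGood_getD d cache hG x (by simpa using hf)
  | succ n ih =>
    intro x path seen hf hseen
    by_cases h : ¬ cache.contains x = true ∧ (d.contains x = true ∧ x ≠ d.getD x x ∧ x ∉ seen)
    · have hf' : pvStep d ((pvStep d)^[n] (pvStep d x)) = (pvStep d)^[n] (pvStep d x) := by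
        rw [← Function.iterate_succ_apply]; exact hf
      have hseen' : ∀ q ∈ PySem.Set.add seen x, ∃ m, 1 ≤ m ∧ (pvStep d)^[m] q = pvStep d x := by
        intro q hq
        rcases (PySem.Set.mem_add seen x q).mp hq with hq1 | hq2
        · obtain ⟨m, hm1, hm2⟩ := hseen q hq1
          exact ⟨m + 1, Nat.le_add_left 1 m, by rw [Function.iterate_succ_apply', hm2]⟩
        · exact ⟨1, le_refl 1, by rw [hq2]; rfl⟩
      have ih' := ih (pvStep d x) (path ++ [x]) (PySem.Set.add seen x) hf' hseen'
      have hL : pvL d (pvStep d x) = pvL d x := pvL_step d hfix x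
      simp only [pvWalk, if_pos h]
      have hi1 := ih'.1
      rw [hL] at hi1
      refine ⟨hi1, ?_⟩
      intro q hq
      rcases ih'.2 q hq with hmem | heq
      · rcases List.mem_append.mp hmem with h1 | h2
        · exact Or.inl h1
        · right
          have hqx : q = x := by simpa using h2
          rw [hqx]
      · exact Or.inr (hL ▸ heq)
    · simp only [pvWalk, if_neg h]
      refine ⟨?_, fun q hq => Or.inl hq⟩
      rcases not_and_or.mp h with h1 | h2
      · -- x is cached
        have hc : cache.contains x = true := by simpa using h1
        cases hv : cache.get? x with
        | none =>
          rw [PySem.Dict.get?_eq_none_iff_contains cache x] at hv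
          rw [hv] at hc
          cases hc
        | some v =>
          rw [PySem.Dict.getD_of_get?_eq_some cache x hv]
          exact hG x v hv
      · -- x is terminal (a revisit would mean a cycle, impossible for an eventually-fixed orbit)
        have hx : pvStep d x = x := by
          by_cases hc : d.contains x = true
          · rcases not_and_or.mp h2 with h3 | h4
            · exact absurd hc h3
            · rcases not_and_or.mp h4 with h5 | h6
              · have := not_not.mp h5
                simp [pvStep, ← this]
              · have hmem : x ∈ seen := not_not.mp h6
                obtain ⟨m, hm1, hm2⟩ := hseen x hmem
                exact pvPeriod_fix d x m (n + 1) hm1 hm2 hf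
          · simpa [pvStep] using PySem.Dict.getD_of_not_contains (d := d) (k := x) (d0 := x)
              (by simpa using hc)
        exact pvGood_getD d cache hG x hx

theorem pvGood_foldl (d : PySem.Dict Int Int) (e : Int) :
    ∀ (p : List Int) (cache : PySem.Dict Int Int), pvGood d cache →
      (∀ q ∈ p, pvL d q = e) →
      pvGood d (p.foldl (fun c q => c.insert q e) cache) := by
  intro p
  induction p with
  | nil => intro cache hG _; simpa using hG
  | cons q p ih =>
    intro cache hG he
    simp only [List.foldl_cons]
    refine ih (cache.insert q e) ?_ (fun r hr => he r (List.mem_cons_of_mem _ hr))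
    intro x v hx
    rw [PySem.Dict.get?_insert cache q x e] at hx
    split at hx
    · next hxq =>
      cases hx
      rw [hxq]
      exact (he q (List.mem_cons_self)).symm
    · exact hG x v hx

theorem pvLoopB_spec (d : PySem.Dict Int Int)
    (hfix : ∀ k ∈ d.keys, pvStep d ((pvStep d)^[d.size] k) = (pvStep d)^[d.size] k) :
    ∀ (l : List Int) (cache res : PySem.Dict Int Int), pvGood d cache → l.Nodup →
      (∀ k ∈ l, res.contains k = false) →
      (pvLoopB d l cache res).items = res.items ++ l.map (fun k => (k, pvL d k)) := by
  intro l
  induction l with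
  | nil => intro cache res _ _ _; simp [pvLoopB]
  | cons k ks ih =>
    intro cache res hG hnd hres
    have hw := pvWalk_spec d hfix cache hG d.size k [] [] (pvStep_fix d hfix k)
      (by intro q hq; cases hq)
    have he : cache.getD (pvWalk d cache d.size k [] []).2 (pvWalk d cache d.size k [] []).2
        = pvL d k := hw.1
    have hq : ∀ q ∈ (pvWalk d cache d.size k [] []).1, pvL d q = pvL d k := by
      intro q hqm
      rcases hw.2 q hqm with h1 | h2
      · simp at h1
      · exact h2
    simp only [pvLoopB]
    rw [ih _ _ (by rw [he]; exact pvGood_foldl d (pvL d k) _ cache hG hq)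
        (List.nodup_cons.mp hnd).2 ?_]
    · rw [PySem.Dict.items_insert_of_not_contains res _ (hres k List.mem_cons_self), he]
      simp
    · intro k' hk'
      rw [PySem.Dict.contains_insert res k k' _]
      have hne : k' ≠ k := fun hh => (List.nodup_cons.mp hnd).1 (hh ▸ hk')
      simp [hne, hres k' (List.mem_cons_of_mem _ hk')]

-- ===== VERDICT (by name: the statement is the Claim_ definition above) =====
theorem propagate_links_spec : Claim_equal_propagate_links := by
  intro links _hdom hpre
  unfold Spec_propagate_links propagate_links propagate_links_alt
  set d := PySem.Dict.ofList links with hd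
  have hfix : ∀ k ∈ d.keys, pvStep d ((pvStep d)^[d.size] k) = (pvStep d)^[d.size] k := hpre
  have hnd : d.keys.Nodup := PySem.Dict.nodup_keys_ofList links
  have hA : (d.keys.foldl (fun c k => c.insert k (pvFollowA d d.size k))
      PySem.Dict.empty).items = d.keys.map (fun k => (k, pvL d k)) := by
    have h := PySem.Dict.items_foldl_insert_fresh d.keys (fun x : Int => x)
      (fun k => pvFollowA d d.size k) PySem.Dict.empty
      (fun a _ => PySem.Dict.contains_empty a) (by simpa using hnd)
    refine h.trans ?_
    simp only [PySem.Dict.empty, List.nil_append]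
    exact List.map_congr_left (fun k _ => by rw [pvFollowA_eq]; rfl)
  have hB : (pvLoopB d d.keys PySem.Dict.empty PySem.Dict.empty).items
      = d.keys.map (fun k => (k, pvL d k)) := by
    rw [pvLoopB_spec d hfix d.keys PySem.Dict.empty PySem.Dict.empty
      (fun x v hx => by simp [PySem.Dict.get?_empty] at hx) hnd
      (fun k _ => PySem.Dict.contains_empty k)]
    simp [PySem.Dict.empty]
  rw [hA, hB]
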